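-- pv_equiv track=rewrite | github.com/Ravelfett/puis | y.py | count
-- ===== SOURCE A (Python) =====
-- def count(board, px, py, vx, vy, v):
--     c = 0
--     m = 0
--     px -= vx
--     py -= vy
--     while px+vx in range(7) and py+vy in range(6):
--         px += vx
--         py += vy
--         if board[px][py] == v:
--             c += 1
--             m = max(m, c)
--         else:
--             c = 0
--     m = max(m, c)
--     return m
-- ===== SOURCE B (Python) =====
-- def count(board, px, py, vx, vy, v):
--     # pass 1: collect the board values along the ray, same cells in the same order A visits
--     cells = []
--     x, y = px, py
--     while 0 <= x < 7 and 0 <= y < 6: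
--         cells.append(board[x][y])
--         x += vx
--         y += vy
--     # pass 2: longest maximal segment of cells equal to v
--     best = 0
--     i = 0
--     n = len(cells)
--     while i < n:
--         if cells[i] != v:
--             i += 1
--             continue
--         j = i
--         while j < n and cells[j] == v:
--             j += 1
--         if j - i > best:
--             best = j - i
--         i = j
--     return best
-- ===== Notes on version B (the rewrite author's own statement) =====
-- stated objective: alternative
-- what changed: B first collects the board values along the ray into a list, then computes the longest maximal segment equal to v with a two-pointer run scan, replacing A's single fused loop that walks the ray while maintaining a running counter and a maximum.
import Mathlib
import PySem

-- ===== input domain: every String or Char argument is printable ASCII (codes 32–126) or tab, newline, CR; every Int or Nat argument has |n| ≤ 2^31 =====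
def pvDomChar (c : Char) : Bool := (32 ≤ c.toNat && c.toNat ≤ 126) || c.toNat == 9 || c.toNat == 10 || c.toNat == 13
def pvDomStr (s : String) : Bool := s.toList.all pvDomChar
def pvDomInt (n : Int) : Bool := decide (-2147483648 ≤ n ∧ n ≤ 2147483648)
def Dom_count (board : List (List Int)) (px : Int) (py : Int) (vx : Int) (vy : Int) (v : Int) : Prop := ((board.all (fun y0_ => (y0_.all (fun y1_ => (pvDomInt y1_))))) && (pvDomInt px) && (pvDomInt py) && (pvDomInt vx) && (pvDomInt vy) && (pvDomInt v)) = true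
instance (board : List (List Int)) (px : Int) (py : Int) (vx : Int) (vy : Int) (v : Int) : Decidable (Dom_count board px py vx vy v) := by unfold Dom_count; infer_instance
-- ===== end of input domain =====

-- B replaces A's fused walk-and-count loop by a two-pass structure (collect the ray's
-- values, then scan its maximal runs of v); alternative decomposition, no speed claim.

-- ===== PORT A =====
-- A's while loop, as fuel recursion; (x, y) is the cell the guard is about to test
-- (= px+vx, py+vy after A's initial decrement, i.e. the original px, py at entry).
-- Under Pre_count (loop terminates, no IndexError) fuel 8 is never exhausted;
-- the `none` branch is the IndexError case, outside Pre_count.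
def countLoop (board : List (List Int)) (vx : Int) (vy : Int) (v : Int) :
    Nat → Int → Int → Int → Int → Int
  | 0, _, _, c, m => max m c
  | fuel + 1, x, y, c, m =>
    if 0 ≤ x ∧ x < 7 ∧ 0 ≤ y ∧ y < 6 then
      match (PySem.List.pyGet? board x).bind (fun row => PySem.List.pyGet? row y) with
      | some cell =>
        if cell = v then countLoop board vx vy v fuel (x + vx) (y + vy) (c + 1) (max m (c + 1))
        else countLoop board vx vy v fuel (x + vx) (y + vy) 0 m
      | none => max m c   -- IndexError in Python
    else max m c

def count (board : List (List Int)) (px : Int) (py : Int) (vx : Int) (vy : Int) (v : Int) : Int :=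
  countLoop board vx vy v 8 px py 0 0

-- ===== PORT B =====
-- B's first while loop: the board values along the ray, in visiting order (fuel as above).
def collect (board : List (List Int)) (vx : Int) (vy : Int) : Nat → Int → Int → List Int
  | 0, _, _ => []
  | fuel + 1, x, y =>
    if 0 ≤ x ∧ x < 7 ∧ 0 ≤ y ∧ y < 6 then
      match (PySem.List.pyGet? board x).bind (fun row => PySem.List.pyGet? row y) with
      | some cell => cell :: collect board vx vy fuel (x + vx) (y + vy)
      | none => []   -- IndexError in Python
    else []

-- length of B's inner `while j < n and cells[j] == v` advance
def runPrefix (v : Int) : List Int → Nat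
  | [] => 0
  | x :: xs => if x = v then runPrefix v xs + 1 else 0

-- B's second while loop: longest maximal segment equal to v (two-pointer scan)
def longestRun (v : Int) : List Int → Int
  | [] => 0
  | x :: xs =>
    if x = v then
      max ((runPrefix v xs : Int) + 1) (longestRun v (xs.drop (runPrefix v xs)))
    else longestRun v xs
termination_by xs => xs.length
decreasing_by
  all_goals simp [List.length_drop]

def count_alt (board : List (List Int)) (px : Int) (py : Int) (vx : Int) (vy : Int) (v : Int) : Int :=
  longestRun v (collect board vx vy 8 px py)

-- ===== PRECONDITION & SPEC =====
-- Pre_count = exactly the inputs on which Python A returns: the walk is not the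
-- stationary in-bounds infinite loop (vx = vy = 0 inside the 7×6 window), and every
-- cell the walk visits (step k with all steps j ≤ k still in the window; at most 7
-- such steps exist) actually exists in `board` (no IndexError).
def Pre_count (board : List (List Int)) (px : Int) (py : Int) (vx : Int) (vy : Int) (v : Int) : Prop :=
  (¬(vx = 0 ∧ vy = 0 ∧ 0 ≤ px ∧ px < 7 ∧ 0 ≤ py ∧ py < 6)) ∧
  ∀ k : Nat, k < 7 →
    (∀ j : Nat, j ≤ k →
      0 ≤ px + j * vx ∧ px + j * vx < 7 ∧ 0 ≤ py + j * vy ∧ py + j * vy < 6) →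
    ((PySem.List.pyGet? board (px + k * vx)).bind
      (fun row => PySem.List.pyGet? row (py + k * vy))).isSome = true
instance (board : List (List Int)) (px : Int) (py : Int) (vx : Int) (vy : Int) (v : Int) : Decidable (Pre_count board px py vx vy v) := by unfold Pre_count; infer_instance

def pvWitness_count : List (List Int) × Int × Int × Int × Int × Int :=
  ([[1,1,0,1,1,1],[0,1,0,0,0,0],[1,0,0,0,0,0],[0,0,0,0,0,0],[0,0,0,0,0,0],[0,0,0,0,0,0],[0,0,0,0,0,0]], 0, 0, 0, 1, 1)

def Spec_count (board : List (List Int)) (px : Int) (py : Int) (vx : Int) (vy : Int) (v : Int) (out : Int) : Prop := out = count_alt board px py vx vy v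
instance (board : List (List Int)) (px : Int) (py : Int) (vx : Int) (vy : Int) (v : Int) (out : Int) : Decidable (Spec_count board px py vx vy v out) := by unfold Spec_count; infer_instance

-- ===== CLAIM (what is proved, stated in full; the proofs are below) =====
def Claim_equal_count : Prop := ∀ (board : List (List Int)) (px : Int) (py : Int) (vx : Int) (vy : Int) (v : Int), Dom_count board px py vx vy v → Pre_count board px py vx vy v → Spec_count board px py vx vy v (count board px py vx vy v)

-- ===== LEMMAS AND PROOFS =====

-- A's fused loop, re-expressed over an already-collected list of cell values.
def fused (v : Int) : List Int → Int → Int → Int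
  | [], c, m => max m c
  | x :: xs, c, m =>
    if x = v then fused v xs (c + 1) (max m (c + 1)) else fused v xs 0 m

-- best run ending-aware accumulator: best v xs c = longest run of v in (v^c ++ xs)
def best (v : Int) : List Int → Int → Int
  | [], c => c
  | x :: xs, c => if x = v then best v xs (c + 1) else max c (best v xs 0)

theorem countLoop_eq_fused (board : List (List Int)) (vx vy v : Int) :
    ∀ (fuel : Nat) (x y c m : Int),
      countLoop board vx vy v fuel x y c m = fused v (collect board vx vy fuel x y) c m := by
  intro fuel
  induction fuel with
  | zero => intro x y c m; simp [countLoop, collect, fused]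
  | succ n ih =>
    intro x y c m
    simp only [countLoop, collect]
    split
    · cases h : (PySem.List.pyGet? board x).bind (fun row => PySem.List.pyGet? row y) with
      | none => simp [fused]
      | some cell =>
        by_cases hv : cell = v <;> simp [fused, hv, ih]
    · simp [fused]

theorem best_ge (v : Int) : ∀ (xs : List Int) (c : Int), c ≤ best v xs c := by
  intro xs
  induction xs with
  | nil => intro c; simp [best]
  | cons x xs ih =>
    intro c
    simp only [best]
    split
    · have := ih (c + 1); omega
    · omega

theorem fused_eq_best (v : Int) :
    ∀ (xs : List Int) (c m : Int), 0 ≤ c → c ≤ m → fused v xs c m = max m (best v xs c) := by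
  intro xs
  induction xs with
  | nil => intro c m _ _; simp [fused, best]
  | cons x xs ih =>
    intro c m hc hcm
    by_cases hv : x = v
    · simp only [fused, best, if_pos hv]
      rw [ih (c + 1) (max m (c + 1)) (by omega) (by omega)]
      have := best_ge v xs (c + 1)
      omega
    · simp only [fused, best, if_neg hv]
      rw [ih 0 m (by omega) (by omega)]
      have := best_ge v xs 0
      omega

theorem best_runPrefix (v : Int) :
    ∀ (xs : List Int) (c : Int), 0 ≤ c →
      best v xs c = max (c + (runPrefix v xs : Int)) (best v (xs.drop (runPrefix v xs)) 0) := by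
  intro xs
  induction xs with
  | nil => intro c hc; simp [best, runPrefix]; omega
  | cons x xs ih =>
    intro c hc
    by_cases hv : x = v
    · simp only [best, runPrefix, if_pos hv]
      rw [ih (c + 1) (by omega)]
      have hd : (xs.drop (runPrefix v xs)) = ((x :: xs).drop (runPrefix v xs + 1)) := by
        simp [List.drop_succ_cons]
      rw [hd]
      push_cast
      omega
    · simp only [best, runPrefix, if_neg hv]
      have := best_ge v xs 0
      simp only [Nat.cast_zero, List.drop_zero, best, if_neg hv]
      omega

theorem longestRun_eq_best_aux (v : Int) :
    ∀ (n : Nat) (xs : List Int), xs.length ≤ n → longestRun v xs = best v xs 0 := by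
  intro n
  induction n with
  | zero =>
    intro xs hn
    have : xs = [] := List.eq_nil_of_length_eq_zero (by omega)
    simp [this, longestRun, best]
  | succ n ih =>
    intro xs hn
    cases xs with
    | nil => simp [longestRun, best]
    | cons x xs =>
      by_cases hv : x = v
      · rw [longestRun, if_pos hv]
        rw [ih (xs.drop (runPrefix v xs)) (by simp [List.length_drop]; simp at hn; omega)]
        simp only [best, if_pos hv, zero_add]
        have h := best_runPrefix v xs 1 (by omega)
        omega
      · rw [longestRun, if_neg hv, ih xs (by simp at hn; omega)]
        simp only [best, if_neg hv]
        have := best_ge v xs 0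
        omega

theorem longestRun_eq_best (v : Int) (xs : List Int) : longestRun v xs = best v xs 0 :=
  longestRun_eq_best_aux v xs.length xs le_rfl

-- ===== VERDICT (by name: the statement is the Claim_ definition above) =====
theorem count_spec : Claim_equal_count := by
  intro board px py vx vy v _ _
  show count board px py vx vy v = count_alt board px py vx vy v
  rw [count, count_alt, countLoop_eq_fused, fused_eq_best v _ 0 0 le_rfl le_rfl,
    longestRun_eq_best]
  have := best_ge v (collect board vx vy 8 px py) 0
  omega
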